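-- pv_equiv track=rewrite | github.com/Tag-Os/ProgStud | lab_4/task_2_recurse.py | calculate_ab
-- ===== SOURCE A (Python) =====
-- def calculate_ab(k, u, v):
--     if k == 1:
--         return u, v
--     else:
--         a_prev, b_prev = calculate_ab(k - 1, u, v)
--         a = 2 * b_prev + a_prev
--         b = 2 * b_prev * b_prev + b_prev
--         return a, b
-- ===== SOURCE B (Python) =====
-- def calculate_ab(k, u, v):
--     a, b = u, v
--     for _ in range(k - 1):
--         a, b = a + 2 * b, 2 * b * b + b
--     return a, b
-- ===== Notes on version B (the rewrite author's own statement) =====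
-- stated objective: simpler
-- what changed: Replaces the top-down recursive unwinding with a bottom-up iterative loop using simultaneous assignment, running the same recurrence k-1 times.
import Mathlib
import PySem

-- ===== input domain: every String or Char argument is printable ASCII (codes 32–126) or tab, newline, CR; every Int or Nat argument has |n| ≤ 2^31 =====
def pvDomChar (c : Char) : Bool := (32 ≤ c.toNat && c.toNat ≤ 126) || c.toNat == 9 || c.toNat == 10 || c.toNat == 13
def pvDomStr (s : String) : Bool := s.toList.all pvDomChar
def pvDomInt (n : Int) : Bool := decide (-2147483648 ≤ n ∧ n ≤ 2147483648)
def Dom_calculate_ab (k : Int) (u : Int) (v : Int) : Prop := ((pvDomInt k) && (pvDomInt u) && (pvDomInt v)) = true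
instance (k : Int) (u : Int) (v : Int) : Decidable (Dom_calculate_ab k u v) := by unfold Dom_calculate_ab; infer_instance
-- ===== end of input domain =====

-- B replaces A's recursive unwinding by a bottom-up iterative loop (simpler: O(1) space, no recursion).

-- ===== PORT A =====
-- A recurses on k-1 until k == 1; for k ≤ 0 the Python recursion never terminates
-- (RecursionError), which is exactly the region Pre_ excludes; the fuel-0 case is unreachable there.
def calculate_ab_A_rec : Nat → Int → Int → Int × Int
  | 0, u, v => (u, v)        -- unreachable inside Pre_ (Python diverges for k ≤ 0)
  | 1, u, v => (u, v)
  | n+2, u, v =>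
      let p := calculate_ab_A_rec (n+1) u v
      let a := 2 * p.2 + p.1
      let b := 2 * p.2 * p.2 + p.2
      (a, b)

def calculate_ab (k : Int) (u : Int) (v : Int) : Int × Int :=
  calculate_ab_A_rec k.toNat u v

-- ===== PORT B =====
-- Source B: a, b = u, v; for _ in range(k-1): a, b = a + 2*b, 2*b*b + b; return a, b
def calculate_ab_alt (k : Int) (u : Int) (v : Int) : Int × Int :=
  (PySem.List.pyRange 0 (k - 1) 1).foldl
    (fun (p : Int × Int) _ => (p.1 + 2 * p.2, 2 * p.2 * p.2 + p.2)) (u, v)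

-- ===== PRECONDITION & SPEC =====
-- Pre_ excludes k ≤ 0, where Python A recurses forever (RecursionError).
def Pre_calculate_ab (k : Int) (u : Int) (v : Int) : Prop := 1 ≤ k
instance (k : Int) (u : Int) (v : Int) : Decidable (Pre_calculate_ab k u v) := by unfold Pre_calculate_ab; infer_instance
def pvWitness_calculate_ab : Int × Int × Int := (4, 1, 1)

def Spec_calculate_ab (k : Int) (u : Int) (v : Int) (out : Int × Int) : Prop := out = calculate_ab_alt k u v
instance (k : Int) (u : Int) (v : Int) (out : Int × Int) : Decidable (Spec_calculate_ab k u v out) := by unfold Spec_calculate_ab; infer_instance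

-- ===== CLAIM =====
def Claim_equal_calculate_ab : Prop := ∀ (k : Int) (u : Int) (v : Int), Dom_calculate_ab k u v → Pre_calculate_ab k u v → Spec_calculate_ab k u v (calculate_ab k u v)

-- ===== LEMMAS AND PROOFS =====
theorem rec_eq_fold (n : Nat) (u v : Int) :
    calculate_ab_A_rec (n + 1) u v =
    (PySem.List.pyRange 0 (n : Int) 1).foldl
      (fun (p : Int × Int) _ => (p.1 + 2 * p.2, 2 * p.2 * p.2 + p.2)) (u, v) := by
  induction n with
  | zero => simp [calculate_ab_A_rec, PySem.List.pyRange]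
  | succ m ih =>
      have hr : PySem.List.pyRange 0 ((m : Int) + 1) 1 =
          PySem.List.pyRange 0 (m : Int) 1 ++ [(m : Int)] := by
        exact PySem.List.pyRange_one_succ_right (by positivity)
      show calculate_ab_A_rec (m + 2) u v = _
      rw [calculate_ab_A_rec]
      push_cast
      rw [hr, List.foldl_append, ← ih]
      simp [Prod.ext_iff]
      ring

-- ===== VERDICT =====
theorem calculate_ab_spec : Claim_equal_calculate_ab := by
  intro k u v _ hpre
  unfold Spec_calculate_ab calculate_ab calculate_ab_alt
  have h1 : 1 ≤ k := hpre
  obtain ⟨n, hn⟩ : ∃ n : Nat, k = (n : Int) + 1 := by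
    refine ⟨(k - 1).toNat, ?_⟩; omega
  subst hn
  have ht : ((n : Int) + 1).toNat = n + 1 := by omega
  rw [ht]
  simpa using rec_eq_fold n u v
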